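-- pv_equiv track=rewrite | github.com/Cosmos-Break/timeword | 提取事件型时间短语.py | tocrfformat
-- ===== SOURCE A (Python) =====
-- def tocrfformat(data):
--     crfFormat = []
--     for line in data:
--         words = line.split()[1:]
--         for word in words:
--             if "/tp" not in word:
--                 word = word.split('/')[0]
--                 length = len(word)
--                 if length == 1:
--                     crfFormat.append(word[0] + "\t" + "S" + "\t" + "O")
--                 elif length == 2:
--                     crfFormat.append(word[0] + "\t" + "B" + "\t" + "O")
--                     crfFormat.append(word[1] + "\t" + "E" + "\t" + "O")
--                 else:  # length >= 3
--                     crfFormat.append(word[0] + "\t" + "B" + "\t" + "O")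
--                     for i in range(1, length - 1):
--                         crfFormat.append(word[i] + "\t" + "M" + "\t" + "O")
--                     crfFormat.append(word[length - 1] + "\t" + "E" + "\t" + "O")
--
--             else:  # 是时间词
--                 word = word.split('/')[0]
--                 length = len(word)
--                 if length == 1:
--                     crfFormat.append(word[0] + "\t" + "S" + "\t" + "TS")
--                 elif length == 2:
--                     crfFormat.append(word[0] + "\t" + "B" + "\t" + "TB")
--                     crfFormat.append(word[1] + "\t" + "E" + "\t" + "TE")
--                 else:  # length >= 3
--                     crfFormat.append(word[0] + "\t" + "B" + "\t" + "TB")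
--                     for i in range(1, length - 1):
--                         crfFormat.append(word[i] + "\t" + "M" + "\t" + "TM")
--                     crfFormat.append(word[length - 1] + "\t" + "E" + "\t" + "TE")
--         crfFormat.append("\n")
--     return crfFormat
-- ===== SOURCE B (Python) =====
-- def tocrfformat(data):
--     out = []
--     for line in data:
--         for word in line.split()[1:]:
--             chars = word.split('/')[0]
--             n = len(chars)
--             tags = "S" if n == 1 else "B" + "M" * (n - 2) + "E"
--             thirds = ["T" + t for t in tags] if "/tp" in word else ["O"] * n
--             out += ["\t".join(row) for row in zip(chars, tags, thirds)]
--         out.append("\n")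
--     return out
-- ===== Notes on version B (the rewrite author's own statement) =====
-- stated objective: alternative
-- what changed: A's six duplicated per-length/per-marker branch blocks that append rows one by one are replaced by building the whole BMES tag string by string repetition ('B'+'M'*(n-2)+'E'), deriving the third column as a parallel list, and emitting rows by zipping the three sequences and tab-joining them.
import Mathlib
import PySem

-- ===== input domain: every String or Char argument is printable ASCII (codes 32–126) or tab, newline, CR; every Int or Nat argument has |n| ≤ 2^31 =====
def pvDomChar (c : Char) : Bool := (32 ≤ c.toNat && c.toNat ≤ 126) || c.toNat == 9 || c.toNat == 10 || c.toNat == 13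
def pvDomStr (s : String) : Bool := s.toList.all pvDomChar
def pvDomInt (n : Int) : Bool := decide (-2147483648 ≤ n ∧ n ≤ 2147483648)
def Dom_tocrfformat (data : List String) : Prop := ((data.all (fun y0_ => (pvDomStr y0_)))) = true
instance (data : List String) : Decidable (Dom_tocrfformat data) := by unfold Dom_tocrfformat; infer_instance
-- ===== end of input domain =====

-- B replaces A's six duplicated per-length/per-marker branch blocks by building the BMES tag
-- string by repetition and zipping three parallel sequences (objective: alternative decomposition).

-- shared helper: exact port of Python `word.split('/')[0]` (both Pythons contain this expression;
-- split? is some since "/" ≠ "", and split always returns at least one piece, so headD's default is unreachable)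
def pvFirst (w : String) : String := ((PySem.Str.split? w "/").getD []).headD ""

-- ===== PORT A =====
-- port of Python `ch + "\t" + tag + "\t" + third` (concatenation, strings as char lists)
def pvEntry (c : Char) (tag third : String) : String :=
  String.ofList (c :: '\t' :: (tag.toList ++ '\t' :: third.toList))

-- the body of A's inner `for word in words` loop, appending to crfFormat
def pvWordA (crfFormat : List String) (word : String) : List String :=
  if PySem.Str.isIn "/tp" word = false then
    let w := (pvFirst word).toList
    let length : Int := PySem.List.len w
    if length = 1 then
      crfFormat ++ [pvEntry (PySem.List.pyGetD w 0 ' ') "S" "O"]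
    else if length = 2 then
      crfFormat ++ [pvEntry (PySem.List.pyGetD w 0 ' ') "B" "O"]
                ++ [pvEntry (PySem.List.pyGetD w 1 ' ') "E" "O"]
    else
      crfFormat ++ [pvEntry (PySem.List.pyGetD w 0 ' ') "B" "O"]
        ++ (PySem.List.pyRange 1 (length - 1)).map (fun i => pvEntry (PySem.List.pyGetD w i ' ') "M" "O")
        ++ [pvEntry (PySem.List.pyGetD w (length - 1) ' ') "E" "O"]
  else
    let w := (pvFirst word).toList
    let length : Int := PySem.List.len w
    if length = 1 then
      crfFormat ++ [pvEntry (PySem.List.pyGetD w 0 ' ') "S" "TS"]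
    else if length = 2 then
      crfFormat ++ [pvEntry (PySem.List.pyGetD w 0 ' ') "B" "TB"]
                ++ [pvEntry (PySem.List.pyGetD w 1 ' ') "E" "TE"]
    else
      crfFormat ++ [pvEntry (PySem.List.pyGetD w 0 ' ') "B" "TB"]
        ++ (PySem.List.pyRange 1 (length - 1)).map (fun i => pvEntry (PySem.List.pyGetD w i ' ') "M" "TM")
        ++ [pvEntry (PySem.List.pyGetD w (length - 1) ' ') "E" "TE"]

def tocrfformat (data : List String) : List String :=
  data.foldl (fun crfFormat line =>
    let words := PySem.List.slice (PySem.Str.split₀ line) (some 1) none   -- line.split()[1:]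
    (words.foldl pvWordA crfFormat) ++ ["\n"]) []

-- ===== PORT B =====
-- the body of B's inner `for word in ...` loop: tag string built by repetition, third column
-- a parallel list, rows produced by zipping the three sequences and tab-joining each row
def pvWordB (out : List String) (word : String) : List String :=
  let chars := (pvFirst word).toList
  let n := chars.length
  let tags : List Char := if n = 1 then ['S'] else 'B' :: List.replicate (n - 2) 'M' ++ ['E']
  let thirds : List String :=
    if PySem.Str.isIn "/tp" word then tags.map (fun t => "T" ++ String.ofList [t])
    else List.replicate n "O"
  out ++ (chars.zip (tags.zip thirds)).map (fun r =>
    PySem.Str.join "\t" [String.ofList [r.1], String.ofList [r.2.1], r.2.2])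

def tocrfformat_alt (data : List String) : List String :=
  data.foldl (fun out line =>
    ((PySem.List.slice (PySem.Str.split₀ line) (some 1) none).foldl pvWordB out) ++ ["\n"]) []

-- ===== PRECONDITION & SPEC =====
-- Pre_ excludes inputs where some word after a line's first token has an empty part before its
-- first '/' (i.e. the word starts with '/'): there A raises IndexError (word[0] on the empty string).
def Pre_tocrfformat (data : List String) : Prop :=
  ∀ line ∈ data, ∀ word ∈ PySem.List.slice (PySem.Str.split₀ line) (some 1) none,
    (pvFirst word).toList ≠ []
instance (data : List String) : Decidable (Pre_tocrfformat data) := by unfold Pre_tocrfformat; infer_instance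
def pvWitness_tocrfformat : List String := ["id1 on/tp x monday/tp", "id2 noon/tp"]

def Spec_tocrfformat (data : List String) (out : List String) : Prop := out = tocrfformat_alt data
instance (data : List String) (out : List String) : Decidable (Spec_tocrfformat data out) := by unfold Spec_tocrfformat; infer_instance

-- ===== CLAIM (what is proved, stated in full; the proofs are below) =====
def Claim_equal_tocrfformat : Prop := ∀ (data : List String), Dom_tocrfformat data → Pre_tocrfformat data → Spec_tocrfformat data (tocrfformat data)

-- ===== LEMMAS AND PROOFS =====

-- single-character string literals and tag prefixing, used to align the two entry forms
lemma pvS : String.ofList ['S'] = "S" := rfl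
lemma pvB : String.ofList ['B'] = "B" := rfl
lemma pvE : String.ofList ['E'] = "E" := rfl
lemma pvM : String.ofList ['M'] = "M" := rfl
lemma pvTS : "T" ++ "S" = "TS" := rfl
lemma pvTB : "T" ++ "B" = "TB" := rfl
lemma pvTE : "T" ++ "E" = "TE" := rfl
lemma pvTM : "T" ++ "M" = "TM" := rfl

-- the built tag string has one tag per character (for a nonempty word)
lemma pvTagsLen (cs : List Char) (h : cs ≠ []) :
    (if cs.length = 1 then ['S'] else 'B' :: List.replicate (cs.length - 2) 'M' ++ ['E']).length = cs.length := by
  have h1 : 1 ≤ cs.length := List.length_pos_iff.mpr h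
  split
  · simp_all
  · simp_all
    omega

-- l zipped with a same-length constant list pairs every element with that constant
lemma pvZipRep {α β : Type} (x : β) : ∀ (l : List α), l.zip (List.replicate l.length x) = l.map (fun a => (a, x))
  | [] => rfl
  | a :: l => by simp [List.replicate_succ, pvZipRep x l]

-- l zipped with its own image pairs every element with its image
lemma pvZipSelfMap {α β : Type} (f : α → β) : ∀ (l : List α), l.zip (l.map f) = l.map (fun a => (a, f a))
  | [] => rfl
  | a :: l => by simp [pvZipSelfMap f l]

-- the tab-join of a three-string row is A's entry form
lemma pvJoin (c t : Char) (s : String) :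
    PySem.Str.join "\t" [String.ofList [c], String.ofList [t], s] = pvEntry c (String.ofList [t]) s := by
  simp [PySem.Str.join, PySem.Chars.join, pvEntry, List.intercalate, List.intersperse]

-- zipping mid++[z] with M-tags++[E] pairs mid with 'M' and z with 'E'
lemma pvZipBME {β : Type} (z : Char) (F : Char × Char → β) :
    ∀ (mid : List Char), ((mid ++ [z]).zip (List.replicate mid.length 'M' ++ ['E'])).map F
      = mid.map (fun c => F (c, 'M')) ++ [F (z, 'E')]
  | [] => rfl
  | c :: mid => by simp [List.replicate_succ, pvZipBME z F mid]

-- the per-word branch structure of A equals B's zip of chars with the built tag string,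
-- for any third-column rule g applied to the (single-char) tag
lemma pvCore (crf : List String) (cs : List Char) (h : cs ≠ []) (g : String → String) :
    (if (PySem.List.len cs : Int) = 1 then crf ++ [pvEntry (PySem.List.pyGetD cs 0 ' ') "S" (g "S")]
     else if (PySem.List.len cs : Int) = 2 then
       crf ++ [pvEntry (PySem.List.pyGetD cs 0 ' ') "B" (g "B")] ++ [pvEntry (PySem.List.pyGetD cs 1 ' ') "E" (g "E")]
     else
       crf ++ [pvEntry (PySem.List.pyGetD cs 0 ' ') "B" (g "B")]
        ++ (PySem.List.pyRange 1 (PySem.List.len cs - 1)).map (fun i => pvEntry (PySem.List.pyGetD cs i ' ') "M" (g "M"))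
        ++ [pvEntry (PySem.List.pyGetD cs (PySem.List.len cs - 1) ' ') "E" (g "E")])
  = crf ++ (cs.zip (if cs.length = 1 then ['S'] else 'B' :: List.replicate (cs.length - 2) 'M' ++ ['E'])).map
      (fun p => pvEntry p.1 (String.ofList [p.2]) (g (String.ofList [p.2]))) := by
  simp only [PySem.List.len_eq]
  match cs, h with
  | [a], _ => simp [PySem.List.pyGetD, pvS]
  | [a, b], _ => simp [PySem.List.pyGetD, pvB, pvE]
  | a :: b :: c :: rest, _ =>
      have hne : (b :: c :: rest : List Char) ≠ [] := by simp
      obtain ⟨mid, z, hsplit⟩ : ∃ mid z, (b :: c :: rest : List Char) = mid ++ [z] :=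
        ⟨_, _, (List.dropLast_append_getLast hne).symm⟩
      rw [hsplit]
      have hml : (mid.length : Int) = (rest.length : Int) + 1 := by
        have := congrArg List.length hsplit
        simp at this
        omega
      have hlen : (((a :: (mid ++ [z])).length : Nat) : Int) = (mid.length : Int) + 2 := by
        simp
        omega
      have hne1 : ¬((((a :: (mid ++ [z])).length : Nat) : Int) = 1) := by omega
      have hne2 : ¬((((a :: (mid ++ [z])).length : Nat) : Int) = 2) := by omega
      rw [if_neg hne1, if_neg hne2]
      -- the range-driven middle+last of A equals mid and z
      have hfull := PySem.List.map_pyGetD_pyRange (a :: (mid ++ [z])) ' ' (a := 1) (by norm_num)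
      simp only [PySem.List.len_eq] at hfull
      have h1 : (((a :: (mid ++ [z])).length : Nat) : Int) - 1 + 1 = (((a :: (mid ++ [z])).length : Nat) : Int) := by omega
      rw [← h1, PySem.List.pyRange_one_succ_right (by omega), List.map_append, List.map_singleton] at hfull
      have hdrop : List.drop (Int.toNat 1) (a :: (mid ++ [z])) = mid ++ [z] := rfl
      rw [hdrop] at hfull
      have hlm : ((PySem.List.pyRange 1 ((((a :: (mid ++ [z])).length : Nat) : Int) - 1)).map
          (fun j => PySem.List.pyGetD (a :: (mid ++ [z])) j ' ')).length = mid.length := by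
        rw [List.length_map, PySem.List.length_pyRange_one]
        omega
      obtain ⟨hmid2, hz2⟩ := List.append_inj hfull hlm
      have hz3 : PySem.List.pyGetD (a :: (mid ++ [z])) ((((a :: (mid ++ [z])).length : Nat) : Int) - 1) ' ' = z := by
        simpa using hz2
      -- rewrite A's middle map through hmid2
      have hmidA : (PySem.List.pyRange 1 ((((a :: (mid ++ [z])).length : Nat) : Int) - 1)).map
          (fun i => pvEntry (PySem.List.pyGetD (a :: (mid ++ [z])) i ' ') "M" (g "M"))
          = mid.map (fun ch => pvEntry ch "M" (g "M")) := by
        rw [show (fun i => pvEntry (PySem.List.pyGetD (a :: (mid ++ [z])) i ' ') "M" (g "M"))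
              = (fun ch => pvEntry ch "M" (g "M")) ∘ (fun j => PySem.List.pyGetD (a :: (mid ++ [z])) j ' ') from rfl,
           ← List.map_map, hmid2]
      rw [hmidA, hz3]
      have hhead : PySem.List.pyGetD (a :: (mid ++ [z])) 0 ' ' = a := by
        simp [PySem.List.pyGetD_ofNat']
      rw [hhead]
      -- the zip side
      have hlen2 : (a :: (mid ++ [z])).length - 2 = mid.length := by simp
      rw [if_neg (by omega : ¬(a :: (mid ++ [z])).length = 1), hlen2]
      simp only [List.cons_append, List.zip_cons_cons, List.map_cons, pvZipBME]
      simp [pvB, pvE, pvM, List.append_assoc]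

lemma pvWordA_eq (crf : List String) (word : String) (h : (pvFirst word).toList ≠ []) :
    pvWordA crf word = pvWordB crf word := by
  unfold pvWordA pvWordB
  have htl : List.replicate ((pvFirst word).toList.length) "O"
      = (if (pvFirst word).toList.length = 1 then ['S']
         else 'B' :: List.replicate ((pvFirst word).toList.length - 2) 'M' ++ ['E']).map (fun _ => "O") := by
    rw [show ((fun _ => "O") : Char → String) = Function.const Char "O" from rfl, List.map_const,
        pvTagsLen _ h]
  cases hb : PySem.Str.isIn "/tp" word with
  | false =>
      simp only [Bool.false_eq_true, if_false, reduceIte]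
      rw [htl, pvZipSelfMap, List.zip_map_right, List.map_map]
      have := pvCore crf ((pvFirst word).toList) h (fun _ => "O")
      rw [this]
      apply congrArg (_ ++ ·)
      apply List.map_congr_left
      intro p _
      simp [Prod.map, pvJoin]
  | true =>
      simp only [if_true]
      rw [pvZipSelfMap, List.zip_map_right, List.map_map]
      have hc := pvCore crf ((pvFirst word).toList) h (fun t => "T" ++ t)
      simp only [pvTS, pvTB, pvTE, pvTM] at hc
      rw [hc]
      apply congrArg (_ ++ ·)
      apply List.map_congr_left
      intro p _
      simp [Prod.map, pvJoin]

lemma pvFold_eq (ws : List String) (crf : List String)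
    (h : ∀ w ∈ ws, (pvFirst w).toList ≠ []) :
    ws.foldl pvWordA crf = ws.foldl pvWordB crf := by
  induction ws generalizing crf with
  | nil => rfl
  | cons w ws ih =>
      simp only [List.foldl_cons]
      rw [pvWordA_eq crf w (h w (by simp))]
      exact ih _ (fun x hx => h x (by simp [hx]))

lemma pvMain (data : List String)
    (h : ∀ line ∈ data, ∀ w ∈ PySem.List.slice (PySem.Str.split₀ line) (some 1) none,
        (pvFirst w).toList ≠ []) (crf : List String) :
    data.foldl (fun crfFormat line =>
      ((PySem.List.slice (PySem.Str.split₀ line) (some 1) none).foldl pvWordA crfFormat) ++ ["\n"]) crf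
  = data.foldl (fun out line =>
      ((PySem.List.slice (PySem.Str.split₀ line) (some 1) none).foldl pvWordB out) ++ ["\n"]) crf := by
  induction data generalizing crf with
  | nil => rfl
  | cons l ls ih =>
      simp only [List.foldl_cons]
      rw [pvFold_eq _ crf (h l (by simp))]
      exact ih (fun x hx => h x (by simp [hx])) _

-- ===== VERDICT (by name: the statement is the Claim_ definition above) =====
theorem tocrfformat_spec : Claim_equal_tocrfformat := by
  intro data _ hpre
  unfold Spec_tocrfformat tocrfformat tocrfformat_alt
  exact pvMain data hpre []
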